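-- pv_equiv track=rewrite | github.com/JakapongMo/new_source_crawlet_project | Main.py | Find_site
-- ===== SOURCE A (Python) =====
-- def Find_site(line_1):
--     site = ''
--     Nb_point =0
--     Nb_slash =0
--     cnt = 0
--     index =0
--     for word in line_1.split():
--         index+=1
--         if index == 1:
--
--             cnt =0
--             for char in word:
--                 cnt +=1
--                 if char == '.':
--                     Nb_point +=1
--                 if char == '/':
--                     Nb_slash +=1
--                 if Nb_slash == 3:
--                     break
--                 if Nb_point == 2:
--                     break
--                 if cnt > 7:
--                     site += char
--
--     if "www." in site:
--         cnt = 0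
--         new_site =''
--         for char in site:
--             cnt+=1
--             if cnt >4:
--                 new_site += char
--     else:
--         new_site =''
--         for char in site:
--             if char == '.':
--                 break
--             new_site += char
--
--     return new_site
-- ===== SOURCE B (Python) =====
-- def Find_site(line_1):
--     toks = line_1.split()
--     if not toks:
--         return ''
--     w = toks[0]
--
--     def nth_index(ch, k):
--         # absolute index of the k-th occurrence of ch in w, or len(w) if fewer
--         pos = 0
--         for c in w:
--             if c == ch:
--                 k -= 1
--                 if k == 0:
--                     return pos
--             pos += 1
--         return pos
--
--     stop = min(nth_index('.', 2), nth_index('/', 3))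
--     site = w[7:stop]
--     if 'www.' in site:
--         return site[4:]
--     d = site.find('.')
--     return site if d == -1 else site[:d]
-- ===== Notes on version B (the rewrite author's own statement) =====
-- stated objective: faster
-- what changed: A builds the site string char-by-char in one interleaved counting/break/accumulation loop and post-processes with two more char-accumulation loops; B instead computes a stop index as the minimum of the 2nd-dot and 3rd-slash occurrence indices and then uses slicing, a substring test and find-based truncation, with no accumulation loops.
import Mathlib
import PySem

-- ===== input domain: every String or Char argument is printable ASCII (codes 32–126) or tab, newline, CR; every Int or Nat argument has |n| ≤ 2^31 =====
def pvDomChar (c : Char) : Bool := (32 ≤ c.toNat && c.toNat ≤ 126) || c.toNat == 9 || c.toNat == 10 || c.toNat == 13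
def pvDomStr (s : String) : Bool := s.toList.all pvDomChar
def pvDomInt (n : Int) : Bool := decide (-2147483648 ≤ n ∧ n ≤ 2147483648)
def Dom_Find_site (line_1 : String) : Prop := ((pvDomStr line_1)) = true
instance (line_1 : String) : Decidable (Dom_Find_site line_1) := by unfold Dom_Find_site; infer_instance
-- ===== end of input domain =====

-- B replaces A's char-accumulation loops by occurrence-index computation plus slicing (objective: simpler).

-- ===== PORT A =====
-- A's inner char loop over the first word: counts, break conditions and accumulation, in A's order.
def pvLoopA : List Char → Int → Int → Int → List Char → (List Char × Int × Int × Int)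
  | [], cnt, np, ns, site => (site, np, ns, cnt)
  | c :: rest, cnt, np, ns, site =>
    let cnt := cnt + 1
    let np := if c = '.' then np + 1 else np
    let ns := if c = '/' then ns + 1 else ns
    if ns = 3 then (site, np, ns, cnt)
    else if np = 2 then (site, np, ns, cnt)
    else if cnt > 7 then pvLoopA rest cnt np ns (site ++ [c])
    else pvLoopA rest cnt np ns site

-- A's outer loop body: state is (site, Nb_point, Nb_slash, cnt, index).
def pvStepA (s : List Char × Int × Int × Int × Int) (word : String) :
    List Char × Int × Int × Int × Int :=
  let index := s.2.2.2.2 + 1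
  if index = 1 then
    let r := pvLoopA word.toList 0 s.2.1 s.2.2.1 s.1
    (r.1, r.2.1, r.2.2.1, r.2.2.2, index)
  else (s.1, s.2.1, s.2.2.1, s.2.2.2.1, index)

-- A's "www." branch loop: keep chars with cnt > 4.
def pvWWW : List Char → Int → List Char → List Char
  | [], _, acc => acc
  | c :: t, cnt, acc =>
    let cnt := cnt + 1
    if cnt > 4 then pvWWW t cnt (acc ++ [c]) else pvWWW t cnt acc

-- A's else branch loop: accumulate until the first '.'.
def pvDot : List Char → List Char → List Char
  | [], acc => acc
  | c :: t, acc => if c = '.' then acc else pvDot t (acc ++ [c])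

def Find_site (line_1 : String) : String :=
  let st := (PySem.Str.split₀ line_1).foldl pvStepA ([], 0, 0, 0, 0)
  let site := st.1
  if PySem.Chars.isIn "www.".toList site then String.ofList (pvWWW site 0 [])
  else String.ofList (pvDot site [])

-- ===== PORT B =====
-- B's helper: absolute index of the k-th occurrence of ch, or the word's length if fewer.
def pvNth : List Char → Char → Int → Int → Int
  | [], _, _, pos => pos
  | c :: t, ch, k, pos =>
    if c = ch then
      if k - 1 = 0 then pos else pvNth t ch (k - 1) (pos + 1)
    else pvNth t ch k (pos + 1)

def Find_site_alt (line_1 : String) : String :=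
  match PySem.Str.split₀ line_1 with
  | [] => ""
  | w :: _ =>
    let wl := w.toList
    let stop := min (pvNth wl '.' 2 0) (pvNth wl '/' 3 0)
    let site := PySem.List.slice wl (some 7) (some stop)
    if PySem.Chars.isIn "www.".toList site then String.ofList (PySem.List.slice site (some 4) none)
    else
      let d := PySem.Chars.find site ['.']
      if d = -1 then String.ofList site else String.ofList (PySem.List.slice site none (some d))

-- ===== PRECONDITION & SPEC =====
def Spec_Find_site (line_1 : String) (out : String) : Prop := out = Find_site_alt line_1
instance (line_1 : String) (out : String) : Decidable (Spec_Find_site line_1 out) := by unfold Spec_Find_site; infer_instance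

-- ===== CLAIM (what is proved, stated in full; the proofs are below) =====
def Claim_equal_Find_site : Prop := ∀ (line_1 : String), Dom_Find_site line_1 → Spec_Find_site line_1 (Find_site line_1)

-- ===== LEMMAS AND PROOFS =====

lemma pvNth_pos_le (t : List Char) (ch : Char) (k pos : Int) : pos ≤ pvNth t ch k pos := by
  induction t generalizing k pos with
  | nil => simp [pvNth]
  | cons c t ih =>
    simp only [pvNth]
    split_ifs
    · omega
    · exact le_trans (by omega) (ih _ _)
    · exact le_trans (by omega) (ih _ _)

lemma pvNth_shift (t : List Char) (ch : Char) (k pos : Int) :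
    pvNth t ch k (pos + 1) = pvNth t ch k pos + 1 := by
  induction t generalizing k pos with
  | nil => simp [pvNth]
  | cons c t ih =>
    simp only [pvNth]
    split_ifs
    · rfl
    · exact ih _ _
    · exact ih _ _

-- the inner loop of A computes: append the chars of the take-until-break region past position 7
lemma pvLoopA_eq (cs : List Char) :
    ∀ (cnt np ns : Int) (site : List Char), 0 ≤ cnt → 0 ≤ np → np ≤ 1 → 0 ≤ ns → ns ≤ 2 →
    (pvLoopA cs cnt np ns site).1 =
      site ++ (cs.take (min (pvNth cs '.' (2 - np) 0) (pvNth cs '/' (3 - ns) 0)).toNat).drop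
        (7 - cnt).toNat := by
  induction cs with
  | nil => intro cnt np ns site _ _ _ _ _; simp [pvLoopA, pvNth]
  | cons c t ih =>
    intro cnt np ns site hc0 hp0 hp1 hs0 hs2
    have hdotpos := pvNth_pos_le t '.' (2 - (np + 1)) 0
    have hdotpos2 := pvNth_pos_le t '.' (2 - np) 0
    have hslashpos := pvNth_pos_le t '/' (3 - (ns + 1)) 0
    have hslashpos2 := pvNth_pos_le t '/' (3 - ns) 0
    by_cases hc : c = '.'
    · have hcs : c ≠ '/' := by rw [hc]; decide
      simp only [pvLoopA, pvNth, if_pos hc, if_neg hcs]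
      rw [if_neg (by omega : ¬ ns = 3)]
      by_cases hp : np = 1
      · -- second dot: break
        rw [if_pos (by omega : np + 1 = 2)]
        rw [if_pos (by omega : 2 - np - 1 = 0)]
        have : (min 0 (pvNth t '/' (3 - ns) 0 + 1)).toNat = 0 := by omega
        rw [pvNth_shift, this]
        simp
      · -- first dot: continue
        have hp' : np = 0 := by omega
        rw [if_neg (by omega : ¬ np + 1 = 2), if_neg (by omega : ¬ 2 - np - 1 = 0)]
        rw [pvNth_shift, pvNth_shift]
        have hmin : (min (pvNth t '.' (2 - np - 1) 0 + 1) (pvNth t '/' (3 - ns) 0 + 1)).toNat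
            = (min (pvNth t '.' (2 - (np + 1)) 0) (pvNth t '/' (3 - ns) 0)).toNat + 1 := by
          have : 2 - np - 1 = 2 - (np + 1) := by ring
          rw [this]; omega
        rw [hmin, List.take_succ_cons]
        by_cases h7 : cnt + 1 > 7
        · rw [if_pos h7, ih (cnt + 1) (np + 1) ns (site ++ [c]) (by omega) (by omega)
            (by omega) hs0 hs2]
          have e0 : (7 - cnt).toNat = 0 := by omega
          have e1 : (7 - (cnt + 1)).toNat = 0 := by omega
          simp [e0, e1]
        · rw [if_neg h7, ih (cnt + 1) (np + 1) ns site (by omega) (by omega) (by omega) hs0 hs2]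
          have e : (7 - cnt).toNat = (7 - (cnt + 1)).toNat + 1 := by omega
          rw [e, List.drop_succ_cons]
    · by_cases hs : c = '/'
      · simp only [pvLoopA, pvNth, if_pos hs, if_neg hc]
        by_cases h3 : ns = 2
        · -- third slash: break
          rw [if_pos (by omega : ns + 1 = 3)]
          rw [if_pos (by omega : 3 - ns - 1 = 0)]
          have : (min (pvNth t '.' (2 - np) 0 + 1) 0).toNat = 0 := by omega
          rw [pvNth_shift, this]
          simp
        · -- continue
          rw [if_neg (by omega : ¬ ns + 1 = 3), if_neg (by omega : ¬ np = 2),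
            if_neg (by omega : ¬ 3 - ns - 1 = 0)]
          rw [pvNth_shift, pvNth_shift]
          have hslashpos3 := pvNth_pos_le t '/' (3 - ns - 1) 0
          have hmin : (min (pvNth t '.' (2 - np) 0 + 1) (pvNth t '/' (3 - ns - 1) 0 + 1)).toNat
              = (min (pvNth t '.' (2 - np) 0) (pvNth t '/' (3 - (ns + 1)) 0)).toNat + 1 := by
            have : 3 - ns - 1 = 3 - (ns + 1) := by ring
            rw [this] at hslashpos3 ⊢; omega
          rw [hmin, List.take_succ_cons]
          by_cases h7 : cnt + 1 > 7
          · rw [if_pos h7, ih (cnt + 1) np (ns + 1) (site ++ [c]) (by omega) hp0 hp1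
              (by omega) (by omega)]
            have e0 : (7 - cnt).toNat = 0 := by omega
            have e1 : (7 - (cnt + 1)).toNat = 0 := by omega
            simp [e0, e1]
          · rw [if_neg h7, ih (cnt + 1) np (ns + 1) site (by omega) hp0 hp1 (by omega) (by omega)]
            have e : (7 - cnt).toNat = (7 - (cnt + 1)).toNat + 1 := by omega
            rw [e, List.drop_succ_cons]
      · -- neither '.' nor '/': counters unchanged
        simp only [pvLoopA, pvNth, if_neg hc, if_neg hs]
        rw [if_neg (by omega : ¬ ns = 3), if_neg (by omega : ¬ np = 2)]
        rw [pvNth_shift, pvNth_shift]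
        have hmin : (min (pvNth t '.' (2 - np) 0 + 1) (pvNth t '/' (3 - ns) 0 + 1)).toNat
            = (min (pvNth t '.' (2 - np) 0) (pvNth t '/' (3 - ns) 0)).toNat + 1 := by omega
        rw [hmin, List.take_succ_cons]
        by_cases h7 : cnt + 1 > 7
        · rw [if_pos h7, ih (cnt + 1) np ns (site ++ [c]) (by omega) hp0 hp1 hs0 hs2]
          have e0 : (7 - cnt).toNat = 0 := by omega
          have e1 : (7 - (cnt + 1)).toNat = 0 := by omega
          simp [e0, e1]
        · rw [if_neg h7, ih (cnt + 1) np ns site (by omega) hp0 hp1 hs0 hs2]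
          have e : (7 - cnt).toNat = (7 - (cnt + 1)).toNat + 1 := by omega
          rw [e, List.drop_succ_cons]

-- tail words of the line leave the site accumulator unchanged
lemma foldl_pvStepA_tail (rest : List String) :
    ∀ (s : List Char × Int × Int × Int × Int), 1 ≤ s.2.2.2.2 →
      (rest.foldl pvStepA s).1 = s.1 := by
  induction rest with
  | nil => intro s _; rfl
  | cons w rest ih =>
    intro s hs
    have h1 : s.2.2.2.2 + 1 ≠ 1 := by omega
    simp only [List.foldl_cons, pvStepA, if_neg h1]
    exact ih _ (by simp; omega)

lemma pvWWW_eq (s : List Char) : ∀ (cnt : Int) (acc : List Char), 0 ≤ cnt →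
    pvWWW s cnt acc = acc ++ s.drop (4 - cnt).toNat := by
  induction s with
  | nil => intro cnt acc _; simp [pvWWW]
  | cons c t ih =>
    intro cnt acc hc
    simp only [pvWWW]
    split_ifs with h
    · have h0 : (4 - cnt).toNat = 0 := by omega
      rw [ih _ _ (by omega), h0]
      have h0' : (4 - (cnt + 1)).toNat = 0 := by omega
      simp [h0']
    · have : (4 - cnt).toNat = (4 - (cnt + 1)).toNat + 1 := by omega
      rw [ih _ _ (by omega), this, List.drop_succ_cons]

lemma pvDot_eq (s : List Char) : ∀ (acc : List Char),
    pvDot s acc = acc ++ s.takeWhile (fun c => !(c == '.')) := by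
  induction s with
  | nil => intro acc; simp [pvDot]
  | cons c t ih =>
    intro acc
    simp only [pvDot]
    by_cases h : c = '.' <;> simp [h, ih]

lemma singleton_prefix_iff_head (a : Char) (l : List Char) : [a] <+: l ↔ l.head? = some a := by
  cases l with
  | nil => simp
  | cons b t => simp [List.cons_prefix_cons, eq_comm]

lemma takeWhile_not_dot (s : List Char) : ∀ d : Nat, d ≤ s.length →
    (∀ i, i < d → s[i]? ≠ some '.') → (s[d]? = some '.' ∨ d = s.length) →
    s.takeWhile (fun c => !(c == '.')) = s.take d := by
  induction s with
  | nil =>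
    intro d hd _ _
    have : d = 0 := by simpa using hd
    subst this; simp
  | cons c t ih =>
    intro d hd h1 h2
    cases d with
    | zero =>
      have hc : c = '.' := by
        rcases h2 with h | h
        · simpa using h
        · simp at h
      simp [hc]
    | succ d =>
      have hc : c ≠ '.' := by have := h1 0 (Nat.succ_pos _); simpa using this
      have ht : t.takeWhile (fun c => !(c == '.')) = t.take d := by
        apply ih d (by simpa using hd)
        · intro i hi; have := h1 (i + 1) (by omega); simpa using this
        · rcases h2 with h | h
          · left; simpa using h
          · right; simpa using h
      simp [hc, ht]

-- B's find-based else branch equals take-until-the-first-dot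
lemma find_dot_eq (s : List Char) :
    (if PySem.Chars.find s ['.'] = -1 then s
     else PySem.List.slice s none (some (PySem.Chars.find s ['.']))) =
      s.takeWhile (fun c => !(c == '.')) := by
  by_cases h : PySem.Chars.find s ['.'] = -1
  · rw [if_pos h]
    have hmem : '.' ∉ s := by
      have := (PySem.Chars.find_eq_neg_one_iff s ['.']).mp h
      rwa [List.singleton_infix_iff] at this
    rw [takeWhile_not_dot s s.length le_rfl ?_ (Or.inr rfl), List.take_length]
    intro i _ hcon
    exact hmem (List.mem_of_getElem? hcon)
  · rw [if_neg h]
    have h0 : 0 ≤ PySem.Chars.find s ['.'] := by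
      have := PySem.Chars.neg_one_le_find s ['.']; omega
    obtain ⟨hpre, hmin⟩ := PySem.Chars.find_spec h0
    rw [PySem.List.slice_to s h0]
    rw [takeWhile_not_dot s (PySem.Chars.find s ['.']).toNat
      (by have := PySem.Chars.find_le_length s ['.']; omega) ?_ ?_]
    · intro i hi hcon
      exact hmin i hi (by rw [singleton_prefix_iff_head, List.head?_drop]; exact hcon)
    · left
      rw [singleton_prefix_iff_head, List.head?_drop] at hpre
      exact hpre

theorem Find_site_spec' : ∀ (line_1 : String), Find_site line_1 = Find_site_alt line_1 := by
  intro line_1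
  unfold Find_site Find_site_alt
  cases hsp : PySem.Str.split₀ line_1 with
  | nil => decide
  | cons w rest =>
    simp only [List.foldl_cons]
    have hstep : pvStepA ([], 0, 0, 0, 0) w =
        ((pvLoopA w.toList 0 0 0 []).1, (pvLoopA w.toList 0 0 0 []).2.1,
          (pvLoopA w.toList 0 0 0 []).2.2.1, (pvLoopA w.toList 0 0 0 []).2.2.2, 1) := by
      simp [pvStepA]
    rw [hstep, foldl_pvStepA_tail rest _ (by simp)]
    have hA : (pvLoopA w.toList 0 0 0 []).1 =
        (w.toList.take (min (pvNth w.toList '.' 2 0) (pvNth w.toList '/' 3 0)).toNat).drop 7 := by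
      have := pvLoopA_eq w.toList 0 0 0 [] le_rfl le_rfl (by omega) le_rfl (by omega)
      simpa using this
    have hd := pvNth_pos_le w.toList '.' 2 0
    have hs := pvNth_pos_le w.toList '/' 3 0
    have hB : PySem.List.slice w.toList (some 7)
        (some (min (pvNth w.toList '.' 2 0) (pvNth w.toList '/' 3 0))) =
        (w.toList.take (min (pvNth w.toList '.' 2 0) (pvNth w.toList '/' 3 0)).toNat).drop 7 := by
      have hcast : (min (pvNth w.toList '.' 2 0) (pvNth w.toList '/' 3 0)) =
          (((min (pvNth w.toList '.' 2 0) (pvNth w.toList '/' 3 0)).toNat : Nat) : Int) := by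
        omega
      rw [hcast]
      rw [show ((7 : Int)) = (((7 : Nat) : Int)) from rfl]
      rw [PySem.List.slice_natCast w.toList 7
        (min (pvNth w.toList '.' 2 0) (pvNth w.toList '/' 3 0)).toNat]
      rw [List.drop_take]
      simp
      omega
    rw [hA, ← hB]
    set site := PySem.List.slice w.toList (some 7)
      (some (min (pvNth w.toList '.' 2 0) (pvNth w.toList '/' 3 0))) with hsite
    by_cases hwww : PySem.Chars.isIn "www.".toList site = true
    · rw [if_pos hwww, if_pos hwww]
      rw [pvWWW_eq site 0 [] le_rfl, PySem.List.slice_from site (by omega : (0 : Int) ≤ 4)]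
      simp
    · rw [if_neg hwww, if_neg hwww]
      rw [pvDot_eq site [], List.nil_append]
      rw [← find_dot_eq site, apply_ite String.ofList]

-- ===== VERDICT (by name: the statement is the Claim_ definition above) =====
theorem Find_site_spec : Claim_equal_Find_site := by
  intro line_1 _
  exact Find_site_spec' line_1
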